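-- pv_equiv track=rewrite | github.com/thunlp/DeepTHULAC | deepthulac/seg/seg_utils.py | pos2spans
-- ===== SOURCE A (Python) =====
-- from typing import List
--
-- def pos2spans(pos: List[str]):
--     # TODO: 统一把word称呼为seg
--     """ 将词_词性标注转换为词的范围_词性（唯一标识） """
--     spans = []
--
--     idx = 0
--     for sp in pos:
--         s, p = sp.rsplit('_', maxsplit=1)
--         spans.append(f'{idx}_{idx+len(s)-1}_{p}')
--         idx += len(s)
--     return spans
-- ===== SOURCE B (Python) =====
-- from typing import List
--
-- def pos2spans(pos: List[str]):
--     """ 将词_词性标注转换为词的范围_词性（唯一标识） """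
--     pairs = [sp.rsplit('_', maxsplit=1) for sp in pos]
--     end = sum(len(s) for s, _ in pairs)
--     spans = []
--     for s, p in reversed(pairs):
--         end -= len(s)
--         spans.append(f'{end}_{end+len(s)-1}_{p}')
--     spans.reverse()
--     return spans
-- ===== Notes on version B (the rewrite author's own statement) =====
-- stated objective: alternative
-- what changed: B builds the spans BACK-TO-FRONT: it parses the tokens, computes the total segment length, then walks the reversed token list subtracting each segment length from a running end offset and finally reverses the output, instead of A's forward pass with a running start index.
import Mathlib
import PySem

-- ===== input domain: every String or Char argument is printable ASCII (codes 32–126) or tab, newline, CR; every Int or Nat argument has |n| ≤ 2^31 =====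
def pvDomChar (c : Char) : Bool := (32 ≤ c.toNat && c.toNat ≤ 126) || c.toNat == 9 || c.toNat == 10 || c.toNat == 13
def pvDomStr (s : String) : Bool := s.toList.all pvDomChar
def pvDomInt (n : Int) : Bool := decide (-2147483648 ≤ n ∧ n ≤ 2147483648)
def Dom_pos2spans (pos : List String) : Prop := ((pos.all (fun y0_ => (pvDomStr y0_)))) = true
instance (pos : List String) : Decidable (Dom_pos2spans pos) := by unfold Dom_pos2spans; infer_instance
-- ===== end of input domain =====

-- B builds the spans back-to-front (total length, reversed walk subtracting lengths, final reverse) instead of A's forward running-index pass; same cost.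

-- ===== PORT A =====
-- hand port of s.rsplit('_', maxsplit=1) when it yields exactly 2 parts, exact on inputs
-- containing '_': scan the reversed characters up to the first '_' (= last '_' of s).
-- On a string without '_' Python's two-name unpacking raises ValueError (excluded by Pre_);
-- the port returns the dummy ("", s) there.
def pvRsplit1 (s : String) : String × String :=
  let r := s.toList.reverse
  let after := r.takeWhile (fun c => c ≠ '_')
  if after.length = r.length then ("", s)
  else (String.ofList ((r.drop (after.length + 1)).reverse), String.ofList after.reverse)

def pos2spans (pos : List String) : List String :=
  (pos.foldl
    (fun (st : Int × List String) sp =>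
      let sp2 := pvRsplit1 sp
      let idx := st.1
      (idx + PySem.Str.len sp2.1,
       st.2 ++ [PySem.Int.toStr idx ++ "_" ++ PySem.Int.toStr (idx + PySem.Str.len sp2.1 - 1) ++ "_" ++ sp2.2]))
    (0, [])).2

-- ===== PORT B =====
def pvFmt (st : Int) (q : String × String) : String :=
  PySem.Int.toStr st ++ "_" ++ PySem.Int.toStr (st + PySem.Str.len q.1 - 1) ++ "_" ++ q.2

def pos2spans_alt (pos : List String) : List String :=
  let pairs := pos.map pvRsplit1
  let total : Int := ((pairs.map (fun q => PySem.Str.len q.1)).sum)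
  let res := pairs.reverse.foldl
    (fun (st : Int × List String) q =>
      let e := st.1 - PySem.Str.len q.1
      (e, st.2 ++ [pvFmt e q]))
    (total, [])
  res.2.reverse

-- ===== PRECONDITION & SPEC =====
-- Pre_ excludes tokens containing no '_': there s.rsplit('_', 1) yields a single part and
-- the two-name unpacking in both A and B raises ValueError.
def Pre_pos2spans (pos : List String) : Prop :=
  (pos.all (fun s => s.toList.contains '_')) = true
instance (pos : List String) : Decidable (Pre_pos2spans pos) := by unfold Pre_pos2spans; infer_instance
def pvWitness_pos2spans : List String := ["ab_n", "c_v"]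
def Spec_pos2spans (pos : List String) (out : List String) : Prop := out = pos2spans_alt pos
instance (pos : List String) (out : List String) : Decidable (Spec_pos2spans pos out) := by unfold Spec_pos2spans; infer_instance

-- ===== CLAIM (what is proved, stated in full; the proofs are below) =====
def Claim_equal_pos2spans : Prop := ∀ (pos : List String), Dom_pos2spans pos → Pre_pos2spans pos → Spec_pos2spans pos (pos2spans pos)

-- ===== LEMMAS AND PROOFS =====

-- forward spans starting at idx, on already-parsed pairs
def pvSpansP (idx : Int) : List (String × String) → List String
  | [] => []
  | q :: tl => pvFmt idx q :: pvSpansP (idx + PySem.Str.len q.1) tl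

lemma pos2spans_loop (pos : List String) : ∀ (idx : Int) (acc : List String),
    (pos.foldl
      (fun (st : Int × List String) sp =>
        let sp2 := pvRsplit1 sp
        let idx := st.1
        (idx + PySem.Str.len sp2.1,
         st.2 ++ [PySem.Int.toStr idx ++ "_" ++ PySem.Int.toStr (idx + PySem.Str.len sp2.1 - 1) ++ "_" ++ sp2.2]))
      (idx, acc)).2
    = acc ++ pvSpansP idx (pos.map pvRsplit1) := by
  induction pos with
  | nil => intro idx acc; simp [pvSpansP]
  | cons sp tl ih =>
      intro idx acc
      simp only [List.foldl_cons, List.map_cons, pvSpansP]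
      rw [ih]
      simp [pvFmt]

lemma backward_loop (pairs : List (String × String)) : ∀ (idx : Int) (acc : List String),
    pairs.reverse.foldl
      (fun (st : Int × List String) q =>
        let e := st.1 - PySem.Str.len q.1
        (e, st.2 ++ [pvFmt e q]))
      (idx + (pairs.map (fun q => PySem.Str.len q.1)).sum, acc)
    = (idx, acc ++ (pvSpansP idx pairs).reverse) := by
  induction pairs with
  | nil => intro idx acc; simp [pvSpansP]
  | cons q tl ih =>
      intro idx acc
      simp only [List.reverse_cons, List.foldl_append, List.map_cons, List.sum_cons, pvSpansP,
        List.reverse_cons]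
      have h : idx + (PySem.Str.len q.1 + (tl.map (fun q => PySem.Str.len q.1)).sum)
          = (idx + PySem.Str.len q.1) + (tl.map (fun q => PySem.Str.len q.1)).sum := by ring
      rw [h, ih (idx + PySem.Str.len q.1) acc]
      simp only [List.foldl_cons, List.foldl_nil]
      have e : idx + PySem.Str.len q.1 - PySem.Str.len q.1 = idx := by ring
      rw [e]
      simp

theorem pos2spans_spec : Claim_equal_pos2spans := by
  intro pos _ _
  unfold Spec_pos2spans pos2spans pos2spans_alt
  simp only []
  rw [pos2spans_loop pos 0 []]
  have := backward_loop (pos.map pvRsplit1) 0 []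
  rw [zero_add] at this
  rw [this]
  simp
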